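-- pv_equiv track=rewrite | github.com/Haimonti/NED-Paper | code/fileWiseLDA.py | extract_words_in_window
-- ===== SOURCE A (Python) =====
-- def extract_words_in_window(tokens, named_entity, window_size_N):
--     '''
--     returns the set of words in the word window of size window_size_N around each occurance of named_entity in tokens
--     '''
--     ne_words = named_entity.split()
--     token_count = len(tokens)
--     ne_word_count = len(ne_words)
--     document = []
--     match_count=0
--     i=0
--     while i < token_count:
--         match=True
--         for j in range(ne_word_count):
--             if(i+j >= token_count or tokens[i+j]!=ne_words[j]):
--                 match=False
--                 continue
--         if(not match):
--             document.append(tokens[i])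
--             i=i+1
--         else:
--             match_count = match_count + 1
--             i= i + ne_word_count
--     return document
-- ===== SOURCE B (Python) =====
-- def extract_words_in_window(tokens, named_entity, window_size_N):
--     '''
--     Staged re-implementation: (1) enumerate every occurrence position of the
--     entity phrase, (2) greedy interval scheduling keeps the leftmost
--     non-overlapping occurrences, (3) filter out all covered indices.
--     '''
--     ne_words = named_entity.split()
--     k = len(ne_words)
--     n = len(tokens)
--     # pass 1: every position where the entity phrase occurs
--     starts = [p for p in range(n - k + 1) if tokens[p:p + k] == ne_words]
--     # pass 2: greedy interval scheduling over the occurrence intervals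
--     chosen = []
--     last_end = 0
--     for p in starts:
--         if p >= last_end:
--             chosen.append(p)
--             last_end = p + k
--     # pass 3: drop every index covered by a chosen occurrence
--     covered = set()
--     for p in chosen:
--         covered.update(range(p, p + k))
--     return [t for idx, t in enumerate(tokens) if idx not in covered]
-- ===== Notes on version B (the rewrite author's own statement) =====
-- stated objective: alternative
-- what changed: A interleaves matching, greedy selection and output in one while loop; B is three staged passes: enumerate every occurrence position of the entity phrase, greedily select the leftmost non-overlapping occurrences (interval scheduling), then filter out all covered indices with a set mask.
-- outside the precondition, e.g. on extract_words_in_window(['a'], '', 0): A does not finish within the time limit, B returns ['a']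
import Mathlib
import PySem

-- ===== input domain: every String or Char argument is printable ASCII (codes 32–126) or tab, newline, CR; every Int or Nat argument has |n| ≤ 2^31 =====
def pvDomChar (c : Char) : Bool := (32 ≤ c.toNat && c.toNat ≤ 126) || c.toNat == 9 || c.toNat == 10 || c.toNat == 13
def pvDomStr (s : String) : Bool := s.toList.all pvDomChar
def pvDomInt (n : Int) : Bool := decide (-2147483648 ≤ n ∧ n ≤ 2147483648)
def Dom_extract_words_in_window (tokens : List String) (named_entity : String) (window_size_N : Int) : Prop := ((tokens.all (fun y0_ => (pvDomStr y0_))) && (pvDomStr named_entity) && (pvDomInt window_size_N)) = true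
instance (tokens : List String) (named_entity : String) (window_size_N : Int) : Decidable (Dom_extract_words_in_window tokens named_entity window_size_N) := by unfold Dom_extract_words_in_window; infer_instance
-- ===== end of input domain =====

-- B replaces A's single interleaved while loop by three staged passes (enumerate all
-- occurrence positions, greedy interval scheduling, mask filter); objective: alternative.
-- window_size_N is accepted and ignored by both programs, exactly as in A.

-- ===== PORT A =====
-- the inner 'for j in range(ne_word_count)' flag loop (no break: 'continue' only skips the rest of the body)
def aMatch (ts ne : List String) (i : Nat) : Bool :=
  (List.range ne.length).foldl
    (fun m j => if ts.length ≤ i + j || ts[i + j]? != ne[j]? then false else m) true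

-- the 'while i < token_count' loop; fuel totalizes it (ts.length iterations suffice whenever
-- ne ≠ [], i.e. on Pre_; on ne = [] with tokens ≠ [] the Python loop never terminates)
def aLoop (ts ne : List String) (fuel : Nat) (i : Nat) (doc : List String) : List String :=
  match fuel with
  | 0 => doc
  | fuel + 1 =>
    if h : i < ts.length then
      if !(aMatch ts ne i) then
        aLoop ts ne fuel (i + 1) (doc ++ [ts[i]])
      else
        aLoop ts ne fuel (i + ne.length) doc
    else doc

def extract_words_in_window (tokens : List String) (named_entity : String) (window_size_N : Int) : List String :=
  aLoop tokens (PySem.Str.split₀ named_entity) tokens.length 0 []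

-- ===== PORT B =====
-- pass 1 of Source B: 'starts = [p for p in range(n - k + 1) if tokens[p:p+k] == ne_words]'
-- (pyRange yields the empty list for a non-positive stop, exactly like Python's range)
def bStarts (ts ne : List String) : List Int :=
  (PySem.List.pyRange 0 ((ts.length : Int) - ne.length + 1) 1).filter
    (fun p => PySem.List.slice ts (some p) (some (p + ne.length)) == ne)

-- pass 2 of Source B: the 'for p in starts' greedy interval-scheduling loop over (chosen, last_end)
def bSelect (k : Int) (starts : List Int) : List Int :=
  (starts.foldl (fun (st : List Int × Int) p =>
      if st.2 ≤ p then (st.1 ++ [p], p + k) else st) (([] : List Int), (0 : Int))).1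

-- pass 3a of Source B: 'covered = set(); for p in chosen: covered.update(range(p, p + k))'
def bCovered (k : Int) (chosen : List Int) : PySem.Set Int :=
  chosen.foldl (fun (s : PySem.Set Int) p =>
    PySem.Set.update s (PySem.List.pyRange p (p + k) 1)) PySem.Set.empty

-- pass 3b: '[t for idx, t in enumerate(tokens) if idx not in covered]'
def extract_words_in_window_alt (tokens : List String) (named_entity : String) (window_size_N : Int) : List String :=
  let ne := PySem.Str.split₀ named_entity
  let covered := bCovered ne.length (bSelect ne.length (bStarts tokens ne))
  ((PySem.List.enumerate tokens 0).filter
      (fun it => !(PySem.Set.contains covered it.1))).map (fun it => it.2)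

-- ===== PRECONDITION & SPEC =====
-- Pre_ excludes only the inputs where named_entity has no words while tokens is nonempty:
-- there A's while loop never advances i (i += ne_word_count = 0) and A diverges; B returns a copy of tokens.
def Pre_extract_words_in_window (tokens : List String) (named_entity : String) (window_size_N : Int) : Prop :=
  PySem.Str.split₀ named_entity ≠ [] ∨ tokens = []
instance (tokens : List String) (named_entity : String) (window_size_N : Int) : Decidable (Pre_extract_words_in_window tokens named_entity window_size_N) := by unfold Pre_extract_words_in_window; infer_instance

def pvWitness_extract_words_in_window : List String × String × Int :=
  (["in", "New", "York", "New", "York", "City", "today"], "New York", 5)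

def Spec_extract_words_in_window (tokens : List String) (named_entity : String) (window_size_N : Int) (out : List String) : Prop := out = extract_words_in_window_alt tokens named_entity window_size_N
instance (tokens : List String) (named_entity : String) (window_size_N : Int) (out : List String) : Decidable (Spec_extract_words_in_window tokens named_entity window_size_N out) := by unfold Spec_extract_words_in_window; infer_instance

-- ===== CLAIM (what is proved, stated in full; the proofs are below) =====
def Claim_equal_extract_words_in_window : Prop := ∀ (tokens : List String) (named_entity : String) (window_size_N : Int), Dom_extract_words_in_window tokens named_entity window_size_N → Pre_extract_words_in_window tokens named_entity window_size_N → Spec_extract_words_in_window tokens named_entity window_size_N (extract_words_in_window tokens named_entity window_size_N)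

-- ===== LEMMAS AND PROOFS =====

-- reference function both programs are reduced to: greedy removal, recursing on the suffix
def canonRemove (ne : List String) : List String → List String
  | [] => []
  | t :: rs =>
    if (t :: rs).take ne.length = ne then canonRemove ne (rs.drop (ne.length - 1))
    else t :: canonRemove ne rs
  termination_by l => l.length
  decreasing_by
  · simp only [List.length_cons]
    exact Nat.lt_succ_of_le (by simp)
  · simp

theorem canon_nil (ne : List String) : canonRemove ne [] = [] := by
  simp [canonRemove]

theorem canon_cons_skip {ne : List String} {t : String} {rs : List String}
    (h : (t :: rs).take ne.length = ne) :
    canonRemove ne (t :: rs) = canonRemove ne (rs.drop (ne.length - 1)) := by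
  rw [canonRemove, if_pos h]

theorem canon_cons_keep {ne : List String} {t : String} {rs : List String}
    (h : ¬ (t :: rs).take ne.length = ne) :
    canonRemove ne (t :: rs) = t :: canonRemove ne rs := by
  rw [canonRemove, if_neg h]

-- characterization of A's inner flag loop
theorem foldl_flag {α : Type} (l : List α) (p : α → Bool) (b : Bool) :
    l.foldl (fun m j => if p j then false else m) b = (b && l.all (fun j => !p j)) := by
  induction l generalizing b with
  | nil => simp
  | cons x l ih =>
    rw [List.foldl_cons, ih]
    by_cases hx : p x <;> simp [hx]

theorem take_eq_iff_getElem? {α : Type} [DecidableEq α] (l ne : List α) :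
    l.take ne.length = ne ↔ ∀ j < ne.length, l[j]? = ne[j]? := by
  constructor
  · intro h j hj
    have := congrArg (fun t => t[j]?) h
    simpa [List.getElem?_take, hj] using this
  · intro h
    apply List.ext_getElem?
    intro j
    by_cases hj : j < ne.length
    · simpa [List.getElem?_take, hj] using h j hj
    · have hj' : ne.length ≤ j := Nat.le_of_not_lt hj
      rw [List.getElem?_eq_none hj', List.getElem?_take]
      simp [hj]

theorem aMatch_eq_take (ts ne : List String) (i : Nat) :
    aMatch ts ne i = ((ts.drop i).take ne.length == ne) := by
  unfold aMatch
  rw [foldl_flag]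
  simp only [Bool.true_and]
  by_cases hm : (ts.drop i).take ne.length = ne
  · have hb : ((ts.drop i).take ne.length == ne) = true := by simpa using hm
    rw [hb, List.all_eq_true]
    rw [take_eq_iff_getElem? (ts.drop i) ne] at hm
    intro j hj
    rw [List.mem_range] at hj
    have hgj := hm j hj
    rw [List.getElem?_drop] at hgj
    have hsome : ne[j]?.isSome := by simp [hj]
    have hlt : i + j < ts.length := by
      by_contra hge
      rw [List.getElem?_eq_none (by omega)] at hgj
      rw [← hgj] at hsome
      simp at hsome
    simp [Nat.not_le.mpr hlt, hgj]
  · have hb : ((ts.drop i).take ne.length == ne) = false := by simpa using hm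
    rw [hb, List.all_eq_false]
    rw [take_eq_iff_getElem? (ts.drop i) ne] at hm
    push Not at hm
    obtain ⟨j, hj, hne⟩ := hm
    rw [List.getElem?_drop] at hne
    refine ⟨j, List.mem_range.mpr hj, ?_⟩
    simp only [Bool.not_eq_eq_eq_not, Bool.not_true]
    by_cases hle : ts.length ≤ i + j
    · simp [hle]
    · simp only [hle, decide_false, Bool.false_or, bne]
      simpa using hne

-- A's loop computes canonRemove
theorem aLoop_eq (ts ne : List String) (hk : 1 ≤ ne.length) :
    ∀ (fuel i : Nat) (doc : List String), ts.length - i ≤ fuel →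
      aLoop ts ne fuel i doc = doc ++ canonRemove ne (ts.drop i) := by
  intro fuel
  induction fuel with
  | zero =>
    intro i doc hf
    have : ts.length ≤ i := by omega
    simp [aLoop, List.drop_eq_nil_of_le this, canon_nil]
  | succ fuel ih =>
    intro i doc hf
    by_cases h : i < ts.length
    · have hdrop : ts.drop i = ts[i] :: ts.drop (i + 1) := List.drop_eq_getElem_cons h
      rw [aLoop]
      rw [dif_pos h]
      rw [aMatch_eq_take]
      by_cases hm : (ts.drop i).take ne.length = ne
      · have : ((ts.drop i).take ne.length == ne) = true := by simpa using hm
        rw [this]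
        simp only [Bool.not_true, Bool.false_eq_true, if_false]
        rw [ih (i + ne.length) doc (by omega)]
        congr 1
        rw [hdrop] at hm ⊢
        rw [canon_cons_skip hm, List.drop_drop]
        congr 2
        omega
      · have : ((ts.drop i).take ne.length == ne) = false := by simpa using hm
        rw [this]
        simp only [Bool.not_false, if_true]
        rw [ih (i + 1) (doc ++ [ts[i]]) (by omega)]
        rw [hdrop] at hm ⊢
        rw [canon_cons_keep hm]
        simp
    · rw [aLoop, dif_neg h]
      rw [List.drop_eq_nil_of_le (by omega), canon_nil, List.append_nil]

-- B-SIDE PROOF -----------------------------------------------------------------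

def cfL (ts : List String) (ne0 : String) (tl : List String) (i : Nat) : List Nat :=
  if i < ts.length then
    if (ts.drop i).take (tl.length + 1) = ne0 :: tl then
      i :: cfL ts ne0 tl (i + (tl.length + 1))
    else cfL ts ne0 tl (i + 1)
  else []
  termination_by ts.length - i

def gsel2 (k : Nat) : List Nat → Nat → List Nat × Nat
  | [], e => ([], e)
  | p :: ps, e =>
    if e ≤ p then ((gsel2 k ps (p + k)).1.cons p, (gsel2 k ps (p + k)).2)
    else gsel2 k ps e

theorem mtch_le {ts : List String} {ne0 : String} {tl : List String} {m : Nat}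
    (h : (ts.drop m).take (tl.length + 1) = ne0 :: tl) :
    m + (tl.length + 1) ≤ ts.length := by
  have := congrArg List.length h
  simp [List.length_take, List.length_drop] at this
  omega

theorem cfL_mem_ge (ts : List String) (ne0 : String) (tl : List String) :
    ∀ (fuel i : Nat), ts.length - i ≤ fuel → ∀ p ∈ cfL ts ne0 tl i, i ≤ p := by
  intro fuel
  induction fuel with
  | zero =>
    intro i hf p hp
    rw [cfL, if_neg (by omega)] at hp
    simp at hp
  | succ fuel ih =>
    intro i hf p hp
    rw [cfL] at hp
    by_cases h : i < ts.length
    · rw [if_pos h] at hp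
      by_cases hm : (ts.drop i).take (tl.length + 1) = ne0 :: tl
      · rw [if_pos hm] at hp
        rcases List.mem_cons.mp hp with h1 | h1
        · omega
        · have := ih (i + (tl.length + 1)) (by omega) p h1
          omega
      · rw [if_neg hm] at hp
        have := ih (i + 1) (by omega) p hp
        omega
    · rw [if_neg h] at hp
      simp at hp

theorem cfL_nil (ts : List String) (ne0 : String) (tl : List String) :
    ∀ (fuel e : Nat), ts.length - e ≤ fuel →
      (∀ p, e ≤ p → ¬ (ts.drop p).take (tl.length + 1) = ne0 :: tl) →
      cfL ts ne0 tl e = [] := by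
  intro fuel
  induction fuel with
  | zero =>
    intro e hf _
    rw [cfL, if_neg (by omega)]
  | succ fuel ih =>
    intro e hf hno
    rw [cfL]
    by_cases h : e < ts.length
    · rw [if_pos h, if_neg (hno e le_rfl)]
      exact ih (e + 1) (by omega) (fun p hp => hno p (by omega))
    · rw [if_neg h]

theorem cfL_first (ts : List String) (ne0 : String) (tl : List String) :
    ∀ (fuel e p : Nat), p - e ≤ fuel → e ≤ p →
      (ts.drop p).take (tl.length + 1) = ne0 :: tl →
      (∀ q, e ≤ q → q < p → ¬ (ts.drop q).take (tl.length + 1) = ne0 :: tl) →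
      cfL ts ne0 tl e = p :: cfL ts ne0 tl (p + (tl.length + 1)) := by
  intro fuel
  induction fuel with
  | zero =>
    intro e p hf he hm _
    have : e = p := by omega
    subst this
    have hlt : e < ts.length := by have := mtch_le hm; omega
    rw [cfL, if_pos hlt, if_pos hm]
  | succ fuel ih =>
    intro e p hf he hm hno
    by_cases hep : e = p
    · subst hep
      have hlt : e < ts.length := by have := mtch_le hm; omega
      rw [cfL, if_pos hlt, if_pos hm]
    · have hlt : e < ts.length := by have := mtch_le hm; omega
      rw [cfL, if_pos hlt, if_neg (hno e le_rfl (by omega))]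
      exact ih (e + 1) p (by omega) (by omega) hm (fun q hq1 hq2 => hno q (by omega) hq2)

theorem gsel2_eq_cfL (ts : List String) (ne0 : String) (tl : List String) :
    ∀ (l : List Nat) (e : Nat), l.Pairwise (· < ·) →
      (∀ p ∈ l, (ts.drop p).take (tl.length + 1) = ne0 :: tl) →
      (∀ p, (ts.drop p).take (tl.length + 1) = ne0 :: tl → e ≤ p → p ∈ l) →
      (gsel2 (tl.length + 1) l e).1 = cfL ts ne0 tl e := by
  intro l
  induction l with
  | nil =>
    intro e _ _ hcomp
    rw [gsel2]
    exact (cfL_nil ts ne0 tl (ts.length - e) e le_rfl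
      (fun p hp hm => by simpa using hcomp p hm hp)).symm
  | cons p ps ih =>
    intro e hsort hsound hcomp
    rw [gsel2]
    by_cases hep : e ≤ p
    · rw [if_pos hep]
      have hmp : (ts.drop p).take (tl.length + 1) = ne0 :: tl := hsound p (List.mem_cons_self ..)
      have hfirst : cfL ts ne0 tl e = p :: cfL ts ne0 tl (p + (tl.length + 1)) := by
        apply cfL_first ts ne0 tl (p - e) e p le_rfl hep hmp
        intro q hq1 hq2 hmq
        rcases List.mem_cons.mp (hcomp q hmq hq1) with h1 | h1
        · omega
        · have := (List.pairwise_cons.mp hsort).1 q h1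
          omega
      rw [hfirst]
      simp only [List.cons.injEq, true_and]
      apply ih
      · exact (List.pairwise_cons.mp hsort).2
      · intro q hq; exact hsound q (List.mem_cons_of_mem _ hq)
      · intro q hmq hq
        rcases List.mem_cons.mp (hcomp q hmq (by omega)) with h1 | h1
        · omega
        · exact h1
    · rw [if_neg hep]
      rw [ih e (List.pairwise_cons.mp hsort).2
        (fun q hq => hsound q (List.mem_cons_of_mem _ hq))
        (fun q hmq hq => by
          rcases List.mem_cons.mp (hcomp q hmq hq) with h1 | h1
          · omega
          · exact h1)]

-- pass-1 normalization: the Int-level starts list is the cast of the Nat-level one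
def natStarts (ts : List String) (ne0 : String) (tl : List String) : List Nat :=
  (List.range (ts.length + 1 - (tl.length + 1))).filter
    (fun m => (ts.drop m).take (tl.length + 1) == ne0 :: tl)

theorem bStarts_eq (ts : List String) (ne0 : String) (tl : List String) :
    bStarts ts (ne0 :: tl) = (natStarts ts ne0 tl).map (fun (m : Nat) => (m : Int)) := by
  unfold bStarts natStarts
  have hcast : PySem.List.pyRange 0 ((ts.length : Int) - (ne0 :: tl).length + 1) 1 =
      (List.range (((ts.length : Int) - (ne0 :: tl).length + 1).toNat)).map (fun (m : Nat) => (m : Int)) := by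
    by_cases hb : 0 ≤ (ts.length : Int) - (ne0 :: tl).length + 1
    · have h1 : (ts.length : Int) - (ne0 :: tl).length + 1 =
          ((((ts.length : Int) - (ne0 :: tl).length + 1).toNat : Nat) : Int) := by omega
      rw [h1]
      exact PySem.List.pyRange_zero_natCast _
    · have h1 : PySem.List.pyRange 0 ((ts.length : Int) - (ne0 :: tl).length + 1) 1 = [] := by
        apply List.eq_nil_of_length_eq_zero
        rw [PySem.List.length_pyRange_one]
        omega
      have h2 : ((ts.length : Int) - (ne0 :: tl).length + 1).toNat = 0 := by omega
      rw [h1, h2]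
      simp
  have htn : ((ts.length : Int) - (ne0 :: tl).length + 1).toNat
      = ts.length + 1 - (tl.length + 1) := by
    simp only [List.length_cons]
    omega
  rw [hcast, htn, List.filter_map]
  congr 1
  apply List.filter_congr
  intro m _
  simp only [Function.comp_apply]
  have hs : PySem.List.slice ts (some (m : Int)) (some ((m : Int) + ((ne0 :: tl).length : Int)))
      = (ts.drop m).take (tl.length + 1) := by
    have := PySem.List.slice_natCast_add ts m (tl.length + 1)
    simpa using this
  rw [hs]

-- pass-2 normalization: the fold over the cast list computes gsel2
theorem bSelect_fold (k' : Nat) :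
    ∀ (l : List Nat) (acc : List Int) (e : Nat),
      (l.map (fun (m : Nat) => (m : Int))).foldl
          (fun (st : List Int × Int) p => if st.2 ≤ p then (st.1 ++ [p], p + (k' : Int)) else st)
          (acc, (e : Int))
        = (acc ++ ((gsel2 k' l e).1.map (fun (m : Nat) => (m : Int))), (((gsel2 k' l e).2 : Nat) : Int)) := by
  intro l
  induction l with
  | nil => intro acc e; simp [gsel2]
  | cons p ps ih =>
    intro acc e
    rw [List.map_cons, List.foldl_cons, gsel2]
    by_cases hep : e ≤ p
    · rw [if_pos (show (acc, (e:Int)).2 ≤ (p:Int) by simp only []; exact_mod_cast hep), if_pos hep]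
      have hc : ((p : Int) + (k' : Int)) = (((p + k' : Nat) : Nat) : Int) := by push_cast; ring
      rw [hc, ih (acc ++ [(p : Int)]) (p + k')]
      simp
    · rw [if_neg (show ¬ (acc, (e:Int)).2 ≤ (p:Int) by simp only []; exact_mod_cast hep), if_neg hep]
      exact ih acc e

theorem covered_mem (k : Int) (chosen : List Int) (x : Int) :
    x ∈ chosen.foldl (fun (s : PySem.Set Int) p =>
        PySem.Set.update s (PySem.List.pyRange p (p + k) 1)) PySem.Set.empty ↔
      ∃ p ∈ chosen, p ≤ x ∧ x < p + k := by
  suffices h : ∀ (l : List Int) (s : PySem.Set Int),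
      x ∈ l.foldl (fun s p => PySem.Set.update s (PySem.List.pyRange p (p + k) 1)) s ↔
        x ∈ s ∨ ∃ p ∈ l, p ≤ x ∧ x < p + k by
    rw [h]
    simp [PySem.Set.empty]
  intro l
  induction l with
  | nil => simp
  | cons p ps ih =>
    intro s
    rw [List.foldl_cons, ih]
    rw [PySem.Set.mem_update]
    rw [PySem.List.mem_pyRange_one]
    constructor
    · rintro ((h | h) | h)
      · exact Or.inl h
      · exact Or.inr ⟨p, List.mem_cons_self .., h⟩
      · obtain ⟨q, hq, h2⟩ := h
        exact Or.inr ⟨q, List.mem_cons_of_mem _ hq, h2⟩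
    · rintro (h | ⟨q, hq, h2⟩)
      · exact Or.inl (Or.inl h)
      · rcases List.mem_cons.mp hq with h1 | h1
        · subst h1; exact Or.inl (Or.inr h2)
        · exact Or.inr ⟨q, h1, h2⟩

theorem out_eq (ts : List String) (ne0 : String) (tl : List String) (cov : Int → Bool) :
    ∀ (fuel i : Nat), ts.length - i ≤ fuel →
      (∀ j : Nat, i ≤ j →
        (cov (j : Int) = false ↔ ∃ p ∈ cfL ts ne0 tl i, p ≤ j ∧ j < p + (tl.length + 1))) →
      ((PySem.List.enumerate (ts.drop i) (i : Int)).filter (fun it => cov it.1)).map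
          (fun it => it.2)
        = canonRemove (ne0 :: tl) (ts.drop i) := by
  intro fuel
  induction fuel with
  | zero =>
    intro i hf _
    rw [List.drop_eq_nil_of_le (by omega)]
    simp [canon_nil]
  | succ fuel ih =>
    intro i hf hcov
    by_cases h : i < ts.length
    · by_cases hm : (ts.drop i).take (tl.length + 1) = ne0 :: tl
      · -- match at i: the whole phrase is filtered out
        have hcf : cfL ts ne0 tl i = i :: cfL ts ne0 tl (i + (tl.length + 1)) := by
          rw [cfL, if_pos h, if_pos hm]
        have hcov' : ∀ j : Nat, i + (tl.length + 1) ≤ j →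
            (cov (j : Int) = false ↔
              ∃ p ∈ cfL ts ne0 tl (i + (tl.length + 1)), p ≤ j ∧ j < p + (tl.length + 1)) := by
          intro j hj
          rw [hcov j (by omega), hcf]
          constructor
          · rintro ⟨p, hp, h1, h2⟩
            rcases List.mem_cons.mp hp with rfl | hp'
            · omega
            · exact ⟨p, hp', h1, h2⟩
          · rintro ⟨p, hp, h1, h2⟩
            exact ⟨p, List.mem_cons_of_mem _ hp, h1, h2⟩
        have hsplit : ts.drop i = (ne0 :: tl) ++ ts.drop (i + (tl.length + 1)) := by
          conv_lhs => rw [← List.take_append_drop (tl.length + 1) (ts.drop i)]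
          rw [hm, List.drop_drop]
        rw [hsplit, PySem.List.enumerate_append, List.filter_append, List.map_append]
        have h1 : (PySem.List.enumerate (ne0 :: tl) (i : Int)).filter (fun it => cov it.1) = [] := by
          apply List.filter_eq_nil_iff.mpr
          intro it hit
          rw [PySem.List.mem_enumerate_iff] at hit
          obtain ⟨r, hr, rfl⟩ := hit
          have hcast : ((i : Int) + (r : Int)) = (((i + r : Nat) : Nat) : Int) := by push_cast; ring
          have hc0 : cov (((i + r : Nat) : Nat) : Int) = false := by
            apply (hcov (i + r) (by omega)).mpr
            refine ⟨i, ?_, by omega, by simp at hr; omega⟩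
            rw [hcf]; exact List.mem_cons_self ..
          simp only [hcast, hc0]
          simp
        rw [h1]
        have hcast2 : ((i : Int) + ((ne0 :: tl).length : Int)) = (((i + (tl.length + 1) : Nat) : Nat) : Int) := by
          push_cast [List.length_cons]; ring
        rw [hcast2]
        have hfu : ts.length - (i + (tl.length + 1)) ≤ fuel := by
          have := mtch_le hm; omega
        rw [ih (i + (tl.length + 1)) hfu hcov']
        -- canonRemove side
        have hk1 : ((ne0 :: tl) ++ ts.drop (i + (tl.length + 1))).take ((ne0 :: tl).length) = ne0 :: tl :=
          List.take_left ..
        have hskip := canon_cons_skip (ne := ne0 :: tl)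
          (t := ne0) (rs := tl ++ ts.drop (i + (tl.length + 1)))
          (by simpa using hk1)
        rw [List.cons_append, hskip]
        simp only [List.length_cons, Nat.add_sub_cancel]
        rw [List.drop_left' rfl]
        simp
      · -- no match at i: token i is kept
        have hcf : cfL ts ne0 tl i = cfL ts ne0 tl (i + 1) := by
          rw [cfL, if_pos h, if_neg hm]
        have hcov' : ∀ j : Nat, i + 1 ≤ j →
            (cov (j : Int) = false ↔
              ∃ p ∈ cfL ts ne0 tl (i + 1), p ≤ j ∧ j < p + (tl.length + 1)) := by
          intro j hj
          rw [hcov j (by omega), hcf]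
        have hdrop : ts.drop i = ts[i] :: ts.drop (i + 1) := List.drop_eq_getElem_cons h
        have hcovi : cov ((i : Nat) : Int) = true := by
          cases hci : cov ((i : Nat) : Int) with
          | false =>
            exfalso
            obtain ⟨p, hp, h1, h2⟩ := (hcov i le_rfl).mp hci
            rw [hcf] at hp
            have := cfL_mem_ge ts ne0 tl (ts.length - (i + 1)) (i + 1) le_rfl p hp
            omega
          | true => rfl
        rw [hdrop, PySem.List.enumerate_cons]
        simp only [List.filter_cons, hcovi, if_true, List.map_cons]
        have hcast : ((i : Int) + 1) = (((i + 1 : Nat) : Nat) : Int) := by push_cast; ring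
        rw [hcast]
        rw [ih (i + 1) (by omega) hcov']
        rw [hdrop] at hm
        have hm' : ¬ (ts[i] :: ts.drop (i + 1)).take ((ne0 :: tl).length) = ne0 :: tl := by
          simpa using hm
        rw [canon_cons_keep hm']
    · rw [List.drop_eq_nil_of_le (by omega)]
      simp [canon_nil]

theorem natStarts_sound (ts : List String) (ne0 : String) (tl : List String) :
    ∀ m ∈ natStarts ts ne0 tl, (ts.drop m).take (tl.length + 1) = ne0 :: tl := by
  intro m hm
  have := (List.mem_filter.mp hm).2
  simpa using this

theorem natStarts_complete (ts : List String) (ne0 : String) (tl : List String) :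
    ∀ m, (ts.drop m).take (tl.length + 1) = ne0 :: tl → m ∈ natStarts ts ne0 tl := by
  intro m hm
  apply List.mem_filter.mpr
  refine ⟨List.mem_range.mpr ?_, by simpa using hm⟩
  have := mtch_le hm
  omega

theorem natStarts_pairwise (ts : List String) (ne0 : String) (tl : List String) :
    (natStarts ts ne0 tl).Pairwise (· < ·) :=
  (List.pairwise_lt_range).filter _

theorem alt_eq_canon (ts : List String) (ne0 : String) (tl : List String) :
    ((PySem.List.enumerate ts 0).filter
        (fun it => !(PySem.Set.contains
          (bCovered ((ne0 :: tl).length) (bSelect ((ne0 :: tl).length) (bStarts ts (ne0 :: tl)))) it.1))).map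
      (fun it => it.2) = canonRemove (ne0 :: tl) ts := by
  have hchosen : bSelect ((ne0 :: tl).length) (bStarts ts (ne0 :: tl))
      = (cfL ts ne0 tl 0).map (fun (m : Nat) => (m : Int)) := by
    unfold bSelect
    rw [bStarts_eq]
    have hfold := bSelect_fold ((ne0 :: tl).length) (natStarts ts ne0 tl) [] 0
    simp only [Nat.cast_zero, List.nil_append] at hfold
    rw [hfold]
    simp only [List.length_cons]
    rw [gsel2_eq_cfL ts ne0 tl (natStarts ts ne0 tl) 0 (natStarts_pairwise ts ne0 tl)
      (natStarts_sound ts ne0 tl) (fun p hp _ => natStarts_complete ts ne0 tl p hp)]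
  rw [hchosen]
  have hcov0 : ∀ j : Nat, 0 ≤ j →
      ((fun x => !(PySem.Set.contains
          (bCovered ((ne0 :: tl).length) ((cfL ts ne0 tl 0).map (fun (m : Nat) => (m : Int)))) x)) (j : Int) = false ↔
        ∃ p ∈ cfL ts ne0 tl 0, p ≤ j ∧ j < p + (tl.length + 1)) := by
    intro j _
    simp only [Bool.not_eq_false']
    rw [PySem.Set.contains_iff]
    unfold bCovered
    rw [covered_mem]
    constructor
    · rintro ⟨p, hp, h1, h2⟩
      obtain ⟨q, hq, rfl⟩ := List.mem_map.mp hp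
      refine ⟨q, hq, by exact_mod_cast h1, ?_⟩
      have : (j : Int) < (q : Int) + ((tl.length + 1 : Nat) : Int) := by
        simpa using h2
      exact_mod_cast this
    · rintro ⟨q, hq, h1, h2⟩
      refine ⟨(q : Int), List.mem_map.mpr ⟨q, hq, rfl⟩, by exact_mod_cast h1, ?_⟩
      have : (j : Int) < (q : Int) + ((tl.length + 1 : Nat) : Int) := by exact_mod_cast h2
      simpa using this
  have h0 := out_eq ts ne0 tl
    (fun x => !(PySem.Set.contains
      (bCovered ((ne0 :: tl).length) ((cfL ts ne0 tl 0).map (fun (m : Nat) => (m : Int)))) x))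
    ts.length 0 (by omega) hcov0
  simpa using h0

-- ===== VERDICT (by name: the statement is the Claim_ definition above) =====
theorem extract_words_in_window_spec : Claim_equal_extract_words_in_window := by
  intro tokens named_entity window_size_N _hdom hpre
  unfold Spec_extract_words_in_window extract_words_in_window extract_words_in_window_alt
  cases hsplit : PySem.Str.split₀ named_entity with
  | nil =>
    rcases hpre with hpre | hpre
    · exact absurd hsplit hpre
    · subst hpre
      rfl
  | cons ne0 tl =>
    rw [aLoop_eq tokens (ne0 :: tl) (by simp) tokens.length 0 [] (by omega)]
    rw [alt_eq_canon tokens ne0 tl]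
    simp
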